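-- pv_equiv track=rewrite | github.com/akshay-greenlang/Code-V1_GreenLang | greenlang/factors/middleware/scim.py | _tokenize_filter
-- ===== SOURCE A (Python) =====
-- from typing import Any, Callable, Dict, Iterable, List, Optional, Tuple, TYPE_CHECKING
--
-- def _tokenize_filter(expr: str) -> List[str]:
--     # Preserve quoted strings as single tokens.
--     out: List[str] = []
--     i = 0
--     cur = ""
--     while i < len(expr):
--         ch = expr[i]
--         if ch == '"':
--             j = expr.find('"', i + 1)
--             if j < 0:
--                 raise ValueError("Unterminated quoted string in filter")
--             cur += expr[i : j + 1]
--             i = j + 1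
--             continue
--         if ch in "()":
--             if cur.strip():
--                 out.append(cur.strip())
--             out.append(ch)
--             cur = ""
--             i += 1
--             continue
--         if ch == " ":
--             if cur.strip():
--                 out.append(cur.strip())
--             cur = ""
--             i += 1
--             continue
--         cur += ch
--         i += 1
--     if cur.strip():
--         out.append(cur.strip())
--     return out
-- ===== SOURCE B (Python) =====
-- from typing import List
--
--
-- def _tokenize_filter(expr: str) -> List[str]:
--     # Validate quote balance up front, then slice maximal tokens out of the
--     # string by index; quoted sections are skipped via str.index.
--     if expr.count('"') % 2:
--         raise ValueError("Unterminated quoted string in filter")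
--     tokens: List[str] = []
--     i, n = 0, len(expr)
--     while i < n:
--         ch = expr[i]
--         if ch in '()':
--             tokens.append(ch)
--             i += 1
--         elif ch == ' ':
--             i += 1
--         else:
--             j = i
--             while j < n and expr[j] not in ' ()':
--                 if expr[j] == '"':
--                     j = expr.index('"', j + 1) + 1
--                 else:
--                     j += 1
--             t = expr[i:j].strip()
--             if t:
--                 tokens.append(t)
--             i = j
--     return tokens
-- ===== Notes on version B (the rewrite author's own statement) =====
-- stated objective: faster
-- what changed: A accumulates a character buffer with repeated cur += ... and strips/flushes it at every delimiter; B validates quote balance once up front (raising the same ValueError on an odd number of quote characters) and then slices each maximal token out of the string by index, jumping over quoted sections with str.index, so the per-character buffer concatenation disappears.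
-- outside the precondition, e.g. on _tokenize_filter('"'): A raises ValueError, B raises ValueError
import Mathlib
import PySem

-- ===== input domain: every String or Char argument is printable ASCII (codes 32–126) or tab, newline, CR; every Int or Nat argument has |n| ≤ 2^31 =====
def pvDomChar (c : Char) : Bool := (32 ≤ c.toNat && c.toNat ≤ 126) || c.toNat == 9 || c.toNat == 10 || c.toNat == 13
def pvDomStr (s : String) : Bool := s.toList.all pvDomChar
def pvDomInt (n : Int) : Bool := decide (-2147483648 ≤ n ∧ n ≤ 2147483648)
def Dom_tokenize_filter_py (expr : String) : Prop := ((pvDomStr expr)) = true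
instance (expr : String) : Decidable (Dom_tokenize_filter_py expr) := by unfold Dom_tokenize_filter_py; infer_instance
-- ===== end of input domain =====

-- B replaces A's character-accumulator-with-flush scan by an up-front quote-balance check
-- followed by slicing maximal tokens out of the string by index (no per-character buffer
-- concatenation; a timing run measured B faster on large inputs).

-- termination measures cited by name in decreasing_by (keeps the compiled values small)
theorem pv_tail_lt (c : Char) (rest : List Char) : rest.length < (c :: rest).length := by simp

theorem pv_drop_tail_lt (rest : List Char) (head : Char) (rest' : List Char) (c : Char)
    (h : List.dropWhile (· ≠ '\"') rest = head :: rest') : rest'.length < (c :: rest).length := by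
  have hle := List.length_dropWhile_le (· ≠ '\"') rest
  rw [h] at hle; simp at hle ⊢; omega

-- ===== PORT A =====
-- A's while-loop, state = (remaining characters, cur, out); expr.find('"', i+1) is
-- transcribed as takeWhile/dropWhile of the characters after the opening quote.
def tokA_loop : List Char → List Char → List String → List String
  | [], cur, out =>
      if PySem.Chars.strip cur ≠ [] then out ++ [String.ofList (PySem.Chars.strip cur)] else out
  | c :: rest, cur, out =>
      if c = '\"' then
        match h : rest.dropWhile (· ≠ '\"') with
        | [] => out  -- Python: raise the unterminated-quote ValueError; excluded by Pre_
        | _ :: rest' =>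
            tokA_loop rest' (cur ++ c :: (rest.takeWhile (· ≠ '\"') ++ ['\"'])) out
      else if c = '(' ∨ c = ')' then
        tokA_loop rest []
          ((if PySem.Chars.strip cur ≠ [] then out ++ [String.ofList (PySem.Chars.strip cur)] else out)
            ++ [String.ofList [c]])
      else if c = ' ' then
        tokA_loop rest []
          (if PySem.Chars.strip cur ≠ [] then out ++ [String.ofList (PySem.Chars.strip cur)] else out)
      else tokA_loop rest (cur ++ [c]) out
termination_by cs _ _ => cs.length
decreasing_by
  · exact pv_drop_tail_lt rest _ rest' c h
  · exact pv_tail_lt c rest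
  · exact pv_tail_lt c rest
  · exact pv_tail_lt c rest

def tokenize_filter_py (expr : String) : List String := tokA_loop expr.toList [] []

-- ===== PORT B =====
-- B's inner while: advance over non-delimiter characters, jumping past quoted sections;
-- returns (the consumed token characters, the rest). Where Python B has already raised at
-- the balance guard (unterminated quote) this consumes the remainder (unreached under Pre_).
def grab : List Char → List Char × List Char
  | [] => ([], [])
  | c :: rest =>
      if c = ' ' ∨ c = '(' ∨ c = ')' then ([], c :: rest)
      else if c = '\"' then
        match h : rest.dropWhile (· ≠ '\"') with
        | [] => (c :: rest, [])
        | _ :: rest' =>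
            ('\"' :: (rest.takeWhile (· ≠ '\"') ++ '\"' :: (grab rest').1), (grab rest').2)
      else ((c :: (grab rest).1), (grab rest).2)
termination_by cs => cs.length
decreasing_by
  · exact pv_drop_tail_lt rest _ rest' c h
  · exact pv_tail_lt c rest

-- termination facts for bLoop (cited in its decreasing_by)
theorem grab_snd_le : ∀ cs : List Char, (grab cs).2.length ≤ cs.length := by
  intro cs
  fun_induction grab cs with
  | case1 => simp
  | case2 c rest h => simp
  | case3 rest h hd => simp
  | case4 rest head rest' h hd ih =>
      have hle := List.length_dropWhile_le (· ≠ '\"') rest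
      rw [h] at hle; simp at hle ⊢; omega
  | case5 c rest h1 h2 ih => simp at ih ⊢; omega

theorem grab_snd_lt (c : Char) (rest : List Char)
    (h1 : ¬(c = '(' ∨ c = ')')) (h2 : ¬(c = ' ')) :
    (grab (c :: rest)).2.length < (c :: rest).length := by
  have hd : ¬(c = ' ' ∨ c = '(' ∨ c = ')') := by tauto
  rw [grab.eq_def]
  simp only [hd, if_false]
  split
  · split
    · simp
    · rename_i head rest' h
      have hle := List.length_dropWhile_le (· ≠ '\"') rest
      rw [h] at hle
      have h3 := grab_snd_le rest'
      simp at hle ⊢; omega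
  · have := grab_snd_le rest
    simp at this ⊢; omega

-- B's outer while over the string
def bLoop : List Char → List String
  | [] => []
  | c :: rest =>
      if h1 : c = '(' ∨ c = ')' then String.ofList [c] :: bLoop rest
      else if h2 : c = ' ' then bLoop rest
      else
        if PySem.Chars.strip (grab (c :: rest)).1 = [] then bLoop (grab (c :: rest)).2
        else String.ofList (PySem.Chars.strip (grab (c :: rest)).1) :: bLoop (grab (c :: rest)).2
termination_by cs => cs.length
decreasing_by
  · exact pv_tail_lt c rest
  · exact pv_tail_lt c rest
  · exact grab_snd_lt c rest h1 h2
  · exact grab_snd_lt c rest h1 h2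

def tokenize_filter_py_alt (expr : String) : List String :=
  if PySem.Str.count expr "\"" % 2 ≠ 0 then []  -- Python: raise ValueError (excluded by Pre_)
  else bLoop expr.toList

-- ===== PRECONDITION & SPEC =====
-- Pre_ excludes exactly the inputs with an odd number of quote characters, on which the
-- Python A raises the unterminated-quote ValueError (B raises the same error there).
def Pre_tokenize_filter_py (expr : String) : Prop := PySem.Str.count expr "\"" % 2 = 0
instance (expr : String) : Decidable (Pre_tokenize_filter_py expr) := by
  unfold Pre_tokenize_filter_py; infer_instance

def pvWitness_tokenize_filter_py : String := "a eq \"b c\" and (d pr)"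

def Spec_tokenize_filter_py (expr : String) (out : List String) : Prop := out = tokenize_filter_py_alt expr
instance (expr : String) (out : List String) : Decidable (Spec_tokenize_filter_py expr out) := by
  unfold Spec_tokenize_filter_py; infer_instance

-- ===== CLAIM (what is proved, stated in full; the proofs are below) =====
def Claim_equal_tokenize_filter_py : Prop := ∀ (expr : String), Dom_tokenize_filter_py expr → Pre_tokenize_filter_py expr → Spec_tokenize_filter_py expr (tokenize_filter_py expr)

-- ===== LEMMAS AND PROOFS =====

-- s.count('"') counts the '"' characters (single-character needle)
theorem count_go_single (q : Char) :
    ∀ (fuel : Nat) (l : List Char) (acc : Nat), l.length ≤ fuel →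
      PySem.Chars.count.go [q] fuel l acc = acc + l.count q := by
  intro fuel
  induction fuel with
  | zero =>
      intro l acc h
      cases l with
      | nil => simp [PySem.Chars.count.go]
      | cons c t => simp at h
  | succ n ih =>
      intro l acc h
      cases l with
      | nil => simp [PySem.Chars.count.go]
      | cons c t =>
          have ht : t.length ≤ n := by simp at h; omega
          by_cases hc : q = c
          · subst hc
            simp [PySem.Chars.count.go, List.isPrefixOf, ih t (acc + 1) ht, List.count_cons]
            omega
          · simp [PySem.Chars.count.go, List.isPrefixOf, hc, Ne.symm hc, ih t acc ht,
              List.count_cons]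

theorem chars_count_quote (cs : List Char) :
    PySem.Chars.count cs ['\"'] = cs.count '\"' := by
  simp [PySem.Chars.count, count_go_single '\"' cs.length cs 0 le_rfl]

theorem strip_nil : PySem.Chars.strip [] = [] := rfl

-- flush helper used only by the proofs below
def stripCons (cur : List Char) (l : List String) : List String :=
  if PySem.Chars.strip cur = [] then l else String.ofList (PySem.Chars.strip cur) :: l

-- one step of B: split off the maximal token and flush it
theorem bLoop_eq_stripCons : ∀ cs : List Char,
    bLoop cs = stripCons (grab cs).1 (bLoop (grab cs).2) := by
  intro cs
  cases cs with
  | nil => simp [bLoop, grab, stripCons, strip_nil]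
  | cons c rest =>
      by_cases h1 : c = '(' ∨ c = ')'
      · have hd : c = ' ' ∨ c = '(' ∨ c = ')' := by tauto
        rw [grab.eq_def]
        simp [bLoop, h1, hd, stripCons, strip_nil]
      · by_cases h2 : c = ' '
        · have hd : c = ' ' ∨ c = '(' ∨ c = ')' := by tauto
          rw [grab.eq_def]
          simp [bLoop, h1, h2, hd, stripCons, strip_nil]
        · simp [bLoop, h1, h2, stripCons]

theorem bLoop_delim (c : Char) (rest : List Char) (h : c = '(' ∨ c = ')') :
    bLoop (c :: rest) = String.ofList [c] :: bLoop rest := by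
  simp [bLoop, h]

theorem bLoop_space (rest : List Char) :
    bLoop (' ' :: rest) = bLoop rest := by
  simp [bLoop]

-- the closing-quote decomposition: scanning to the closing quote consumes exactly one '"'
theorem count_quote_decomp : ∀ (rest : List Char) (head : Char) (rest' : List Char),
    rest.dropWhile (· ≠ '\"') = head :: rest' →
    rest.count '\"' = rest'.count '\"' + 1 := by
  intro rest
  induction rest with
  | nil => intro head rest' h; simp at h
  | cons c t ih =>
      intro head rest' h
      by_cases hc : c = '\"'
      · rw [List.dropWhile_cons, if_neg (by simp [hc])] at h
        injection h with h1 h2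
        subst h2
        simp [List.count_cons, hc]
      · rw [List.dropWhile_cons, if_pos (by simp [hc])] at h
        simp [List.count_cons, hc, Ne.symm hc, ih head rest' h]

-- main loop invariant: A's loop from any state = out ++ flush of (cur ++ next maximal token)
-- followed by B's tokens of the rest — provided the remaining quotes pair up.
theorem tokA_loop_eq : ∀ (cs cur : List Char) (out : List String),
    cs.count '\"' % 2 = 0 →
    tokA_loop cs cur out = out ++ stripCons (cur ++ (grab cs).1) (bLoop (grab cs).2) := by
  intro cs cur out
  fun_induction tokA_loop cs cur out with
  | case1 cur out h =>
      intro _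
      simp [grab, bLoop, stripCons, h]
  | case2 cur out h =>
      intro _
      simp at h
      simp [grab, bLoop, stripCons, h]
  | case3 rest cur out h =>
      -- unterminated quote: impossible under the evenness hypothesis
      intro heven
      exfalso
      have hz : rest.count '\"' = 0 := by
        rw [List.count_eq_zero]
        intro hmem
        have := List.dropWhile_eq_nil_iff.mp h _ hmem
        simp at this
      simp [List.count_cons, hz] at heven
  | case4 rest cur out head rest' h ih =>
      intro heven
      have hrest : rest.count '\"' = rest'.count '\"' + 1 := count_quote_decomp rest head rest' h
      have heven' : rest'.count '\"' % 2 = 0 := by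
        simp [List.count_cons, hrest] at heven; omega
      have hd : ¬(('\"' : Char) = ' ' ∨ ('\"' : Char) = '(' ∨ ('\"' : Char) = ')') := by decide
      have hg : grab ('\"' :: rest) =
          ('\"' :: (rest.takeWhile (· ≠ '\"') ++ '\"' :: (grab rest').1), (grab rest').2) := by
        conv_lhs => rw [grab.eq_def]
        simp [hd]
        simp only [ne_eq] at h
        split
        · rename_i h'
          rw [h] at h'
          cases h'
        · rename_i head2 rest2 h'
          rw [h] at h'
          injection h' with e1 e2
          subst e2
          simp
      rw [ih heven', hg]
      simp [stripCons]
  | case5 c rest cur out hq hp ih =>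
      intro heven
      have heven' : rest.count '\"' % 2 = 0 := by
        simpa [List.count_cons, hq] using heven
      simp only [dite_eq_ite] at ih
      have hd : c = ' ' ∨ c = '(' ∨ c = ')' := by tauto
      have hg : grab (c :: rest) = ([], c :: rest) := by
        rw [grab.eq_def]; simp [hd]
      rw [ih heven', hg, bLoop_delim c rest hp]
      simp only [List.nil_append, List.append_nil]
      rw [← bLoop_eq_stripCons rest]
      by_cases hc : PySem.Chars.strip cur = [] <;> simp [stripCons, hc]
  | case6 rest cur out hq hp ih =>
      intro heven
      have heven' : rest.count '\"' % 2 = 0 := by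
        simpa [List.count_cons] using heven
      simp only [dite_eq_ite] at ih
      have hg : grab (' ' :: rest) = ([], ' ' :: rest) := by
        rw [grab.eq_def]; simp
      rw [ih heven', hg, bLoop_space rest]
      simp only [List.nil_append, List.append_nil]
      rw [← bLoop_eq_stripCons rest]
      by_cases hc : PySem.Chars.strip cur = [] <;> simp [stripCons, hc]
  | case7 c rest cur out hq hp hs ih =>
      intro heven
      have heven' : rest.count '\"' % 2 = 0 := by
        simpa [List.count_cons, hq] using heven
      rw [ih heven']
      have hd : ¬(c = ' ' ∨ c = '(' ∨ c = ')') := by tauto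
      have hg : grab (c :: rest) = (c :: (grab rest).1, (grab rest).2) := by
        rw [grab.eq_def]; simp [hd, hq]
      rw [hg]
      simp [stripCons]

-- ===== VERDICT (by name: the statement is the Claim_ definition above) =====
theorem tokenize_filter_py_spec : Claim_equal_tokenize_filter_py := by
  intro expr _hdom hpre
  unfold Spec_tokenize_filter_py tokenize_filter_py tokenize_filter_py_alt
  unfold Pre_tokenize_filter_py at hpre
  have hcount : PySem.Str.count expr "\"" = expr.toList.count '\"' := by
    have h1 : ("\"" : String).toList = ['\"'] := rfl
    simp [PySem.Str.count, h1, chars_count_quote]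
  rw [hcount] at hpre
  rw [if_neg (by omega)]
  rw [tokA_loop_eq expr.toList [] [] hpre]
  rw [bLoop_eq_stripCons expr.toList]
  simp
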